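-- pv_equiv track=rewrite | github.com/the-mrinal/alphabet-150 | 1477-find-two-non-overlapping-sub-arrays-each-with-target-sum/1477-find-two-non-overlapping-sub-arrays-each-with-target-sum.py | minSumOfLengths
-- ===== SOURCE A (Python) =====
-- from typing import List
--
-- def minSumOfLengths(arr: List[int], target: int) -> int:
--     start = 0
--     currSum = 0
--     n = len(arr)
--
--     smallest_len_sum_index = [float('inf')]*n
--     curr_smallest_len_sum = float('inf')
--     best_smallest_sum = float('inf')
--     count = 0
--
--     for end in range(n):
--         currSum += arr[end]
--
--         while currSum > target and start <= end:
--             currSum -= arr[start]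
--             start += 1
--
--         if currSum == target:
--             currLength = end - start + 1
--             if start > 0 and smallest_len_sum_index[start - 1] != float('inf'):
--                 best_smallest_sum = min(smallest_len_sum_index[start - 1] + currLength,best_smallest_sum)
--             curr_smallest_len_sum = min(curr_smallest_len_sum,currLength)
--         smallest_len_sum_index[end] = curr_smallest_len_sum
--
--
--
--     return -1 if best_smallest_sum == float('inf') else best_smallest_sum
-- ===== SOURCE B (Python) =====
-- from typing import List
--
-- def minSumOfLengths(arr: List[int], target: int) -> int:
--     n = len(arr)
--     # pass 1: run the sliding window once, recording every (start, end) where it hits target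
--     matches = []
--     s = 0
--     curr = 0
--     for e in range(n):
--         curr += arr[e]
--         while curr > target and s <= e:
--             curr -= arr[s]
--             s += 1
--         if curr == target:
--             matches.append((s, e))
--     # pass 2: two-pointer scan over the match events (ends increase, starts never decrease):
--     # pbest = min length among strictly earlier matches lying entirely left of the current start
--     best = None
--     pbest = None
--     j = 0
--     for i, (ms, me) in enumerate(matches):
--         while j < i and matches[j][1] + 1 <= ms:
--             s0, e0 = matches[j]
--             L = e0 - s0 + 1
--             if pbest is None or L < pbest:
--                 pbest = L
--             j += 1
--         if pbest is not None and ms <= me: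
--             tot = pbest + (me - ms + 1)
--             if best is None or tot < best:
--                 best = tot
--     return -1 if best is None else best
-- ===== Notes on version B (the rewrite author's own statement) =====
-- stated objective: alternative
-- what changed: Replaces A's fused loop with its O(n) DP array smallest_len_sum_index by a staged decomposition: one sliding-window pass that only records the match events (start, end), then a two-pointer scan over that event list that maintains the running min length of strictly earlier non-overlapping matches, so no length-n array is ever allocated.
import Mathlib
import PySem

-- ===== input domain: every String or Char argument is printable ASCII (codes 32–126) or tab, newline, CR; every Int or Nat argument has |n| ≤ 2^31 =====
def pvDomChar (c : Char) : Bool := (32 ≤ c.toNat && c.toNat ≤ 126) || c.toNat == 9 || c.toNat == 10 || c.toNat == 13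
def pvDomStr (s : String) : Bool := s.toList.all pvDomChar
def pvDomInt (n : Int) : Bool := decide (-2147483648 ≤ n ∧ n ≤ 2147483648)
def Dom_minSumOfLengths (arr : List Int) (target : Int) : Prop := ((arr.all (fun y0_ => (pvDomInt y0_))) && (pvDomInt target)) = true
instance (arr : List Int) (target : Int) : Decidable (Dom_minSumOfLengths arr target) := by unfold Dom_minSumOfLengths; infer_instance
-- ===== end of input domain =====

-- B replaces A's fused loop with its length-n DP array by a staged decomposition (record the
-- sliding-window match events, then a two-pointer scan over that event list); same O(n) cost.

-- Python's float('inf') sentinel is modelled exactly by Option Int (none = inf): it is only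
-- ever compared for equality with inf and min-combined with ints, never mixed arithmetically.

-- min over Option-with-inf: min(x, v) where x may be inf (shared by both ports' translit of min / if-less updates)
def omin : Option Int → Int → Option Int
  | none, v => some v
  | some x, v => some (min x v)

-- the shared inner while loop `while currSum > target and start <= end:` (identical lines in A and B)
def shrink (arr : List Int) (target : Int) (e : Nat) (start : Nat) (s : Int) : Nat × Int :=
  if h : target < s ∧ start ≤ e then
    shrink arr target e (start + 1) (s - arr.getD start 0)
  else (start, s)
  termination_by e + 1 - start
  decreasing_by omega

-- ===== PORT A =====
-- state: (start, currSum, smallest_len_sum_index, curr_smallest_len_sum, best_smallest_sum)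
def loopA (arr : List Int) (target : Int) :
    List Nat → Nat × Int × List (Option Int) × Option Int × Option Int →
    Nat × Int × List (Option Int) × Option Int × Option Int
  | [], st => st
  | e :: es, (start, currSum, left, curr, best) =>
      let currSum := currSum + arr.getD e 0
      let p := shrink arr target e start currSum
      let start := p.1
      let currSum := p.2
      let st2 :
          Option Int × Option Int :=
        if currSum = target then
          let currLength : Int := (e : Int) - (start : Int) + 1
          let best :=
            if 0 < start then
              match left.getD (start - 1) none with
              | some v => omin best (v + currLength)   -- min(smallest_len_sum_index[start-1]+currLength, best)
              | none => best                           -- the `!= float('inf')` guard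
            else best
          (omin curr currLength, best)
        else (curr, best)
      let left := left.set e st2.1                      -- smallest_len_sum_index[end] = curr_smallest_len_sum
      loopA arr target es (start, currSum, left, st2.1, st2.2)

def minSumOfLengths (arr : List Int) (target : Int) : Int :=
  let n := arr.length
  let st := loopA arr target (List.range n) (0, 0, List.replicate n none, none, none)
  match st.2.2.2.2 with
  | none => -1
  | some b => b

-- ===== PORT B =====
-- pass 1: the same sliding window, but only recording the match events (start, end)
def pass1 (arr : List Int) (target : Int) :
    List Nat → Nat × Int × List (Nat × Nat) → Nat × Int × List (Nat × Nat)
  | [], st => st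
  | e :: es, (s, curr, ms) =>
      let curr := curr + arr.getD e 0
      let p := shrink arr target e s curr
      let ms := if p.2 = target then ms ++ [(p.1, e)] else ms
      pass1 arr target es (p.1, p.2, ms)

-- the inner `while j < i and matches[j][1] + 1 <= ms:` pointer advance
def advB (all : List (Nat × Nat)) (i : Nat) (s : Nat) (j : Nat) (pbest : Option Int) :
    Nat × Option Int :=
  if h : j < i ∧ (all.getD j (0, 0)).2 + 1 ≤ s then
    let m := all.getD j (0, 0)
    let L : Int := (m.2 : Int) - (m.1 : Int) + 1
    let pbest :=
      match pbest with            -- if pbest is None or L < pbest: pbest = L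
      | none => some L
      | some pv => if L < pv then some L else some pv
    advB all i s (j + 1) pbest
  else (j, pbest)
  termination_by i - j
  decreasing_by omega

-- pass 2: `for i, (ms, me) in enumerate(matches): …`
def loopB (all : List (Nat × Nat)) :
    List (Nat × Nat) → Nat → Nat → Option Int → Option Int → Option Int
  | [], _, _, _, best => best
  | m :: rest, i, j, pbest, best =>
      let a := advB all i m.1 j pbest
      let best :=
        match a.2 with            -- if pbest is not None and ms <= me:
        | some p =>
            if m.1 ≤ m.2 then
              let tot : Int := p + ((m.2 : Int) - (m.1 : Int) + 1)
              match best with     -- if best is None or tot < best: best = tot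
              | none => some tot
              | some bv => if tot < bv then some tot else some bv
            else best
        | none => best
      loopB all rest (i + 1) a.1 a.2 best

def minSumOfLengths_alt (arr : List Int) (target : Int) : Int :=
  let n := arr.length
  let st := pass1 arr target (List.range n) (0, 0, [])
  let mts := st.2.2
  match loopB mts mts 0 0 none none with
  | none => -1
  | some b => b

-- ===== PRECONDITION & SPEC =====
def Spec_minSumOfLengths (arr : List Int) (target : Int) (out : Int) : Prop := out = minSumOfLengths_alt arr target
instance (arr : List Int) (target : Int) (out : Int) : Decidable (Spec_minSumOfLengths arr target out) := by unfold Spec_minSumOfLengths; infer_instance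

-- ===== CLAIM (what is proved, stated in full; the proofs are below) =====
def Claim_equal_minSumOfLengths : Prop := ∀ (arr : List Int) (target : Int), Dom_minSumOfLengths arr target → Spec_minSumOfLengths arr target (minSumOfLengths arr target)

-- ===== LEMMAS AND PROOFS =====

def mlen (m : Nat × Nat) : Int := (m.2 : Int) - (m.1 : Int) + 1

def minLen (ms : List (Nat × Nat)) : Option Int := ms.foldl (fun a m => omin a (mlen m)) none

-- one combine step of the common specification: past = the strictly earlier matches
def bestStep (past : List (Nat × Nat)) (best : Option Int) (m : Nat × Nat) : Option Int :=
  if m.1 ≤ m.2 then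
    match minLen (past.filter (fun m' => decide (m'.2 + 1 ≤ m.1))) with
    | some p => omin best (p + mlen m)
    | none => best
  else best

def bestGo (past : List (Nat × Nat)) (best : Option Int) : List (Nat × Nat) → Option Int
  | [] => best
  | m :: rest => bestGo (past ++ [m]) (bestStep past best m) rest

def bestSpec (ms : List (Nat × Nat)) : Option Int := bestGo [] none ms

theorem minLen_append (l : List (Nat × Nat)) (m : Nat × Nat) :
    minLen (l ++ [m]) = omin (minLen l) (mlen m) := by
  simp [minLen, List.foldl_append]

theorem bestGo_append (l : List (Nat × Nat)) (m : Nat × Nat) :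
    ∀ past best, bestGo past best (l ++ [m]) = bestStep (past ++ l) (bestGo past best l) m := by
  induction l with
  | nil => intro past best; simp [bestGo]
  | cons a tl ih =>
      intro past best
      simp only [List.cons_append, bestGo, ih]
      simp

theorem omin_match (o : Option Int) (v : Int) :
    (match o with
     | none => some v
     | some x => if v < x then some v else some x) = omin o v := by
  cases o with
  | none => rfl
  | some x => simp only [omin, min_def]; split_ifs <;> (first | rfl | omega)

theorem shrink_start_le (arr : List Int) (t : Int) (e : Nat) :
    ∀ start s, start ≤ (shrink arr t e start s).1 := by
  intro start s
  fun_induction shrink arr t e start s with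
  | case1 _ _ _ ih => omega
  | case2 => simp

theorem shrink_le_succ (arr : List Int) (t : Int) (e : Nat) :
    ∀ start s, start ≤ e + 1 → (shrink arr t e start s).1 ≤ e + 1 := by
  intro start s h
  fun_induction shrink arr t e start s with
  | case1 _ _ h2 ih => exact ih (by omega)
  | case2 => simpa using h

theorem loopA_append (arr : List Int) (t : Int) (l1 l2 : List Nat) :
    ∀ st, loopA arr t (l1 ++ l2) st = loopA arr t l2 (loopA arr t l1 st) := by
  induction l1 with
  | nil => intro st; rfl
  | cons e es ih =>
      intro st
      obtain ⟨a, b, c, d, f⟩ := st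
      simp only [List.cons_append, loopA]
      exact ih _

theorem pass1_append (arr : List Int) (t : Int) (l1 l2 : List Nat) :
    ∀ st, pass1 arr t (l1 ++ l2) st = pass1 arr t l2 (pass1 arr t l1 st) := by
  induction l1 with
  | nil => intro st; rfl
  | cons e es ih =>
      intro st
      obtain ⟨a, b, c⟩ := st
      simp only [List.cons_append, pass1]
      exact ih _

-- the invariant tying A's fused state to B's event list after processing indices [0, k)
def InvAB (arr : List Int) (k : Nat)
    (a : Nat × Int × List (Option Int) × Option Int × Option Int)
    (b : Nat × Int × List (Nat × Nat)) : Prop :=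
  a.1 = b.1 ∧ a.2.1 = b.2.1 ∧ a.1 ≤ k ∧
  (∀ m ∈ b.2.2, m.1 ≤ a.1 ∧ m.2 < k) ∧
  b.2.2.Pairwise (fun x y => x.1 ≤ y.1 ∧ x.2 < y.2) ∧
  a.2.2.2.1 = minLen b.2.2 ∧
  a.2.2.1.length = arr.length ∧
  (∀ i, i < k → a.2.2.1.getD i none = minLen (b.2.2.filter (fun m => decide (m.2 ≤ i)))) ∧
  (∀ i, k ≤ i → a.2.2.1.getD i none = none) ∧
  a.2.2.2.2 = bestSpec b.2.2

theorem getD_set (l : List (Option Int)) (k i : Nat) (v : Option Int) :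
    (l.set k v).getD i none = if i = k ∧ k < l.length then v else l.getD i none := by
  simp only [List.getD_eq_getElem?_getD, List.getElem?_set]
  by_cases h1 : k = i
  · subst h1
    by_cases h2 : k < l.length <;> simp [h2]
  · have : ¬ (i = k ∧ k < l.length) := by tauto
    simp [h1, this]

theorem loopA_one (arr : List Int) (t : Int) (e : Nat) (start : Nat) (cs : Int)
    (left : List (Option Int)) (curr best : Option Int) :
    loopA arr t [e] (start, cs, left, curr, best) =
      ((shrink arr t e start (cs + arr.getD e 0)).1,
       (shrink arr t e start (cs + arr.getD e 0)).2,
       left.set e (if (shrink arr t e start (cs + arr.getD e 0)).2 = t then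
           omin curr ((e : Int) - ((shrink arr t e start (cs + arr.getD e 0)).1 : Int) + 1)
         else curr),
       (if (shrink arr t e start (cs + arr.getD e 0)).2 = t then
           omin curr ((e : Int) - ((shrink arr t e start (cs + arr.getD e 0)).1 : Int) + 1)
         else curr),
       (if (shrink arr t e start (cs + arr.getD e 0)).2 = t then
           (if 0 < (shrink arr t e start (cs + arr.getD e 0)).1 then
              match left.getD ((shrink arr t e start (cs + arr.getD e 0)).1 - 1) none with
              | some v => omin best
                  (v + ((e : Int) - ((shrink arr t e start (cs + arr.getD e 0)).1 : Int) + 1))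
              | none => best
            else best)
         else best)) := by
  simp only [loopA]
  split_ifs <;> rfl

theorem pass1_one (arr : List Int) (t : Int) (e : Nat) (s : Nat) (c : Int)
    (ms : List (Nat × Nat)) :
    pass1 arr t [e] (s, c, ms) =
      ((shrink arr t e s (c + arr.getD e 0)).1,
       (shrink arr t e s (c + arr.getD e 0)).2,
       (if (shrink arr t e s (c + arr.getD e 0)).2 = t then
           ms ++ [((shrink arr t e s (c + arr.getD e 0)).1, e)]
         else ms)) := by
  simp only [pass1]

theorem stepInv (arr : List Int) (t : Int) (k : Nat) (hk : k < arr.length)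
    (sa : Nat) (ca : Int) (left : List (Option Int)) (curr best : Option Int)
    (sb : Nat) (cb : Int) (ms : List (Nat × Nat))
    (h : InvAB arr k (sa, ca, left, curr, best) (sb, cb, ms)) :
    InvAB arr (k + 1) (loopA arr t [k] (sa, ca, left, curr, best)) (pass1 arr t [k] (sb, cb, ms)) := by
  obtain ⟨h1, h2, h3, h4, h5, h6, h7, h8, h9, h10⟩ := h
  have hsab : sa = sb := h1
  have hcab : ca = cb := h2
  subst hsab hcab
  have H3 : sa ≤ k := h3
  have H4 : ∀ m ∈ ms, m.1 ≤ sa ∧ m.2 < k := h4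
  have H6 : curr = minLen ms := h6
  have H7 : left.length = arr.length := h7
  have H8 : ∀ i, i < k → left.getD i none = minLen (ms.filter (fun m => decide (m.2 ≤ i))) := h8
  have H9 : ∀ i, k ≤ i → left.getD i none = none := h9
  have H10 : best = bestSpec ms := h10
  rw [loopA_one, pass1_one]
  set p := shrink arr t k sa (ca + arr.getD k 0) with hp
  have hs1 : sa ≤ p.1 := shrink_start_le arr t k sa _
  have hs2 : p.1 ≤ k + 1 := shrink_le_succ arr t k sa _ (by omega)
  by_cases hmatch : p.2 = t
  · -- the window hit the target: a match event (p.1, k) is appended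
    simp only [if_pos hmatch]
    refine ⟨rfl, rfl, hs2, ?_, ?_, ?_, ?_, ?_, ?_, ?_⟩
    · intro m hm
      rcases List.mem_append.mp hm with hm | hm
      · exact ⟨(H4 m hm).1.trans hs1, by have := (H4 m hm).2; omega⟩
      · have : m = (p.1, k) := by simpa using hm
        subst this
        exact ⟨le_rfl, by omega⟩
    · refine List.pairwise_append.mpr ⟨h5, List.pairwise_singleton _ _, ?_⟩
      intro a ha b hb
      have : b = (p.1, k) := by simpa using hb
      subst this
      exact ⟨(H4 a ha).1.trans hs1, (H4 a ha).2⟩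
    · show omin curr ((k : Int) - (p.1 : Int) + 1) = minLen (ms ++ [(p.1, k)])
      rw [minLen_append, ← H6]
      rfl
    · show (left.set k _).length = arr.length
      rw [List.length_set]
      exact H7
    · intro i hi
      rw [getD_set]
      by_cases hik : i = k
      · subst hik
        rw [if_pos ⟨rfl, by omega⟩]
        have hfs : (ms ++ [(p.1, i)]).filter (fun m => decide (m.2 ≤ i)) = ms ++ [(p.1, i)] := by
          apply List.filter_eq_self.mpr
          intro m hm
          rcases List.mem_append.mp hm with hm | hm
          · exact decide_eq_true (by have := (H4 m hm).2; omega)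
          · have : m = (p.1, i) := by simpa using hm
            subst this
            exact decide_eq_true le_rfl
        rw [hfs, minLen_append, ← H6]
        rfl
      · rw [if_neg (by tauto)]
        rw [H8 i (by omega)]
        rw [List.filter_append]
        have : [(p.1, k)].filter (fun m => decide (m.2 ≤ i)) = [] := by
          simp only [List.filter_eq_nil_iff]
          intro m hm
          have : m = (p.1, k) := by simpa using hm
          subst this
          simp only [decide_eq_true_eq]
          omega
        rw [this, List.append_nil]
    · intro i hi
      rw [getD_set, if_neg (by omega)]
      exact H9 i (by omega)
    · -- the combine step equals bestStep on the strictly earlier matches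
      have hgo : bestSpec (ms ++ [(p.1, k)]) = bestStep ms (bestSpec ms) (p.1, k) := by
        show bestGo [] none (ms ++ [(p.1, k)]) = bestStep ms (bestSpec ms) (p.1, k)
        rw [bestGo_append]
        rfl
      show (if 0 < p.1 then
              match left.getD (p.1 - 1) none with
              | some v => omin best (v + ((k : Int) - (p.1 : Int) + 1))
              | none => best
            else best) = bestSpec (ms ++ [(p.1, k)])
      rw [hgo, ← H10, bestStep]
      by_cases hp0 : p.1 = 0
      · rw [if_neg (by omega), if_pos (by simp [hp0])]
        have : ms.filter (fun m' => decide (m'.2 + 1 ≤ (p.1, k).1)) = [] := by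
          apply List.filter_eq_nil_iff.mpr
          intro m hm
          simp only [decide_eq_true_eq]
          omega
        rw [this]
        rfl
      · by_cases hpk : p.1 ≤ k
        · rw [if_pos (by omega), if_pos (by simpa using hpk)]
          rw [H8 (p.1 - 1) (by omega)]
          have hfe : ms.filter (fun m => decide (m.2 ≤ p.1 - 1))
              = ms.filter (fun m' => decide (m'.2 + 1 ≤ (p.1, k).1)) := by
            apply List.filter_congr
            intro m _
            simp only [decide_eq_decide]
            omega
          rw [hfe]
          cases minLen (ms.filter (fun m' => decide (m'.2 + 1 ≤ (p.1, k).1))) <;> rfl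
        · rw [if_pos (by omega), if_neg (by simpa using hpk)]
          rw [H9 (p.1 - 1) (by omega)]
  · -- no match: the state carries over unchanged
    simp only [if_neg hmatch]
    refine ⟨rfl, rfl, hs2, ?_, h5, H6, ?_, ?_, ?_, H10⟩
    · intro m hm
      exact ⟨(H4 m hm).1.trans hs1, by have := (H4 m hm).2; omega⟩
    · rw [List.length_set]
      exact H7
    · intro i hi
      rw [getD_set]
      by_cases hik : i = k
      · subst hik
        rw [if_pos ⟨rfl, by omega⟩]
        have hfs : ms.filter (fun m => decide (m.2 ≤ i)) = ms := by
          apply List.filter_eq_self.mpr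
          intro m hm
          exact decide_eq_true (by have := (H4 m hm).2; omega)
        rw [hfs]
        exact H6
      · rw [if_neg (by tauto)]
        exact H8 i (by omega)
    · intro i hi
      rw [getD_set, if_neg (by omega)]
      exact H9 i (by omega)

theorem sync (arr : List Int) (t : Int) :
    ∀ k, k ≤ arr.length →
      InvAB arr k (loopA arr t (List.range k) (0, 0, List.replicate arr.length none, none, none))
        (pass1 arr t (List.range k) (0, 0, [])) := by
  intro k
  induction k with
  | zero =>
      intro _
      simp only [List.range_zero]
      refine ⟨rfl, rfl, le_rfl, by simp [pass1, loopA], by simp [pass1, loopA],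
        rfl, by simp [loopA], ?_, ?_, rfl⟩
      · intro i hi; omega
      · intro i _
        show (List.replicate arr.length (none : Option Int)).getD i none = none
        simp only [List.getD_eq_getElem?_getD, List.getElem?_replicate]
        split_ifs <;> rfl
  | succ k ih =>
      intro hk
      have hk' : k ≤ arr.length := by omega
      have h := ih hk'
      rw [List.range_succ, loopA_append, pass1_append]
      set a := loopA arr t (List.range k) (0, 0, List.replicate arr.length none, none, none) with ha
      set b := pass1 arr t (List.range k) (0, 0, []) with hb
      obtain ⟨sa, ca, left, curr, best⟩ := a
      obtain ⟨sb, cb, ms⟩ := b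
      exact stepInv arr t k (by omega) sa ca left curr best sb cb ms h

theorem filter_eq_take {α : Type} (p : α → Bool) :
    ∀ (l : List α) (r : Nat), r ≤ l.length →
      (∀ m ∈ l.take r, p m = true) → (∀ m ∈ l.drop r, p m = false) →
      l.filter p = l.take r := by
  intro l
  induction l with
  | nil => intro r _ _ _; simp
  | cons a tl ih =>
      intro r hr h1 h2
      cases r with
      | zero =>
          simp only [List.take_zero]
          have h2' : ∀ m ∈ a :: tl, ¬ (p m = true) := by
            intro m hm
            simp [h2 m (by simpa using hm)]
          exact List.filter_eq_nil_iff.mpr h2'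
      | succ r =>
          have hpa : p a = true := h1 a (by simp)
          simp only [List.take_succ_cons, List.filter_cons_of_pos hpa]
          rw [ih r (by simpa using hr) (by intro m hm; exact h1 m (by simp [hm]))
            (by intro m hm; exact h2 m (by simpa using hm))]

theorem advB_spec (all : List (Nat × Nat)) (i s : Nat)
    (hpe : all.Pairwise (fun x y => x.1 ≤ y.1 ∧ x.2 < y.2)) (hi : i ≤ all.length) :
    ∀ j pbest, j ≤ i → (∀ m' ∈ all.take j, m'.2 + 1 ≤ s) → pbest = minLen (all.take j) →
      j ≤ (advB all i s j pbest).1 ∧ (advB all i s j pbest).1 ≤ i ∧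
      (advB all i s j pbest).2 = minLen (all.take (advB all i s j pbest).1) ∧
      (∀ m' ∈ all.take (advB all i s j pbest).1, m'.2 + 1 ≤ s) ∧
      (∀ idx, (advB all i s j pbest).1 ≤ idx → idx < i →
        ¬ ((all.getD idx (0, 0)).2 + 1 ≤ s)) := by
  intro j pbest
  fun_induction advB all i s j pbest with
  | case1 j pbest hcond m L pbest' ih =>
      intro hj htake hpb
      have hjlen : j < all.length := by omega
      have hm : m = all[j] := List.getD_eq_getElem all (0,0) hjlen
      have hts : all.take (j + 1) = all.take j ++ [all[j]] := by
        rw [List.take_add_one]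
        simp [List.getElem?_eq_getElem hjlen]
      -- pbest' = minLen (all.take (j+1))
      have hpb' : pbest' = minLen (all.take (j + 1)) := by
        rw [hts, minLen_append, ← hpb, ← hm]
        exact omin_match pbest L
      have htake' : ∀ m' ∈ all.take (j + 1), m'.2 + 1 ≤ s := by
        intro m' hm'
        rw [hts] at hm'
        rcases List.mem_append.mp hm' with hm' | hm'
        · exact htake m' hm'
        · have : m' = all[j] := by simpa using hm'
          rw [this, ← hm]
          exact hcond.2
      have := ih (by omega) htake' hpb'
      refine ⟨by omega, this.2.1, this.2.2.1, this.2.2.2.1, this.2.2.2.2⟩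
  | case2 j pbest hcond =>
      intro hj htake hpb
      refine ⟨le_rfl, hj, hpb, htake, ?_⟩
      intro idx hidx1 hidx2
      -- the scan stopped: j = i is impossible here, so the condition failed at j
      have hji : ¬ (j < i ∧ (all.getD j (0, 0)).2 + 1 ≤ s) := hcond
      by_cases hji2 : j < i
      · have hfail : ¬ ((all.getD j (0, 0)).2 + 1 ≤ s) := by tauto
        have hjlen : j < all.length := by omega
        have hidxlen : idx < all.length := by omega
        rcases Nat.eq_or_lt_of_le hidx1 with heq | hlt
        · subst heq; exact hfail
        · have hpair := (List.pairwise_iff_getElem.mp hpe) j idx hjlen hidxlen hlt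
          rw [List.getD_eq_getElem all (0,0) hjlen] at hfail
          rw [List.getD_eq_getElem all (0,0) hidxlen]
          omega
      · omega

theorem loopB_eq (all : List (Nat × Nat))
    (hpe : all.Pairwise (fun x y => x.1 ≤ y.1 ∧ x.2 < y.2)) :
    ∀ (todo : List (Nat × Nat)) (i j : Nat) (pbest best : Option Int),
      todo = all.drop i → i ≤ all.length → j ≤ i →
      (∀ m' ∈ all.take j, ∀ m ∈ todo, m'.2 + 1 ≤ m.1) →
      pbest = minLen (all.take j) →
      loopB all todo i j pbest best = bestGo (all.take i) best todo := by
  intro todo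
  induction todo with
  | nil => intro i j pbest best _ _ _ _ _; rfl
  | cons m rest ih =>
      intro i j pbest best htodo hi hj H hpb
      have hilen : i < all.length := by
        by_contra hc
        push_neg at hc
        rw [List.drop_eq_nil_of_le hc] at htodo
        exact List.cons_ne_nil m rest htodo
      have hdrop := List.drop_eq_getElem_cons hilen
      rw [hdrop] at htodo
      obtain ⟨hm1, hrest⟩ : m = all[i] ∧ rest = all.drop (i + 1) := by
        constructor
        · exact (List.cons.injEq _ _ _ _ ▸ htodo).1
        · exact (List.cons.injEq _ _ _ _ ▸ htodo).2
      have Hs : ∀ m' ∈ all.take j, m'.2 + 1 ≤ m.1 := fun m' h' => H m' h' m (by simp)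
      obtain ⟨hjr, hri, hpb2, htk, hfail⟩ :=
        advB_spec all i m.1 hpe (le_of_lt hilen) j pbest hj Hs hpb
      have hrlen : (advB all i m.1 j pbest).1 ≤ (all.take i).length := by
        simp only [List.length_take]
        omega
      have htt : (all.take i).take (advB all i m.1 j pbest).1
          = all.take (advB all i m.1 j pbest).1 := by
        rw [List.take_take, Nat.min_eq_left hri]
      have hflt : (all.take i).filter (fun m' => decide (m'.2 + 1 ≤ m.1))
          = all.take (advB all i m.1 j pbest).1 := by
        rw [filter_eq_take _ _ _ hrlen ?_ ?_, htt]
        · intro x hx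
          rw [htt] at hx
          exact decide_eq_true (htk x hx)
        · intro x hx
          obtain ⟨d, hd, hx2⟩ := List.mem_iff_getElem.mp hx
          have hidx : ((all.take i).drop (advB all i m.1 j pbest).1)[d]
              = all[(advB all i m.1 j pbest).1 + d]'(by
                simp only [List.length_drop, List.length_take] at hd ⊢; omega) := by
            rw [List.getElem_drop, List.getElem_take]
          have hdi : (advB all i m.1 j pbest).1 + d < i := by
            simp only [List.length_drop, List.length_take] at hd
            omega
          have := hfail ((advB all i m.1 j pbest).1 + d) (by omega) hdi
          rw [List.getD_eq_getElem all (0,0) (by omega)] at this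
          rw [← hx2, hidx]
          simpa using this
      -- one combine step equals bestStep on the strictly earlier matches
      have hstep :
          (match (advB all i m.1 j pbest).2 with
            | some p =>
                if m.1 ≤ m.2 then
                  let tot : Int := p + ((m.2 : Int) - (m.1 : Int) + 1)
                  match best with
                  | none => some tot
                  | some bv => if tot < bv then some tot else some bv
                else best
            | none => best)
          = bestStep (all.take i) best m := by
        rw [bestStep, hflt, ← hpb2]
        cases hp : (advB all i m.1 j pbest).2 with
        | none => split_ifs <;> rfl
        | some p =>
            by_cases hg : m.1 ≤ m.2
            · simp only [hg, if_pos]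
              exact omin_match best (p + mlen m)
            · simp [hg]
      have H' : ∀ m' ∈ all.take (advB all i m.1 j pbest).1, ∀ m2 ∈ rest, m'.2 + 1 ≤ m2.1 := by
        intro m' h' m2 h2
        have ha : m'.2 + 1 ≤ m.1 := htk m' h'
        have : m.1 ≤ m2.1 := by
          rw [hrest] at h2
          obtain ⟨d, hd, he⟩ := List.mem_iff_getElem.mp h2
          have hlen2 : i + 1 + d < all.length := by
            simp only [List.length_drop] at hd; omega
          have he2 : m2 = all[i + 1 + d]'hlen2 := by
            rw [← he, List.getElem_drop]
          have hpair := (List.pairwise_iff_getElem.mp hpe) i (i + 1 + d) hilen hlen2 (by omega)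
          rw [hm1, he2]
          exact hpair.1
        omega
      have hrec := ih (i + 1) (advB all i m.1 j pbest).1 (advB all i m.1 j pbest).2 (bestStep (all.take i) best m)
        hrest hilen (by omega) H' hpb2
      have htko : all.take i ++ [m] = all.take (i + 1) := by
        rw [List.take_add_one]
        simp [List.getElem?_eq_getElem hilen, hm1]
      calc loopB all (m :: rest) i j pbest best
          = loopB all rest (i + 1) (advB all i m.1 j pbest).1 (advB all i m.1 j pbest).2
              (bestStep (all.take i) best m) := by rw [loopB, hstep]
        _ = bestGo (all.take (i + 1)) (bestStep (all.take i) best m) rest := hrec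
        _ = bestGo (all.take i) best (m :: rest) := by rw [bestGo, htko]

-- ===== VERDICT (by name: the statement is the Claim_ definition above) =====
theorem minSumOfLengths_spec : Claim_equal_minSumOfLengths := by
  intro arr t _hdom
  unfold Spec_minSumOfLengths
  have hs := sync arr t arr.length le_rfl
  obtain ⟨h1, h2, h3, h4, h5, h6, h7, h8, h9, h10⟩ := hs
  simp only [minSumOfLengths, minSumOfLengths_alt]
  have hB : loopB (pass1 arr t (List.range arr.length) (0, 0, [])).2.2
      (pass1 arr t (List.range arr.length) (0, 0, [])).2.2 0 0 none none
      = bestSpec (pass1 arr t (List.range arr.length) (0, 0, [])).2.2 := by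
    rw [loopB_eq _ h5 _ 0 0 none none List.drop_zero.symm (Nat.zero_le _) le_rfl
      (by simp) rfl]
    simp [bestSpec]
  rw [hB, ← h10]
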